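-- pv_equiv track=rewrite | github.com/matthew-goldman/ansible-demo | scripts/roles_up.py | get_required_version
-- ===== SOURCE A (Python) =====
-- def get_required_version(requirements, name):
--     """
--     Returns the version declared in the requirements file for a
--     given name.
--     """
--     version = None
--     for item in requirements:
--         if item['name'] == name:
--             try:
--                 version = item['version']
--             except KeyError:
--                 pass
--     return version
-- ===== SOURCE B (Python) =====
-- def get_required_version(requirements, name):
--     """
--     Returns the version declared in the requirements file for a
--     given name.
--     """
--     table = {}
--     for item in requirements:
--         if 'version' in item:
--             table[item['name']] = item['version']
--     return table.get(name)
-- ===== Notes on version B (the rewrite author's own statement) =====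
-- stated objective: idiomatic
-- what changed: One pass builds a name-to-version dict (last write wins) and the answer is a single table.get(name), replacing the per-item name-equality branch with an index-then-lookup structure.
import Mathlib
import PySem

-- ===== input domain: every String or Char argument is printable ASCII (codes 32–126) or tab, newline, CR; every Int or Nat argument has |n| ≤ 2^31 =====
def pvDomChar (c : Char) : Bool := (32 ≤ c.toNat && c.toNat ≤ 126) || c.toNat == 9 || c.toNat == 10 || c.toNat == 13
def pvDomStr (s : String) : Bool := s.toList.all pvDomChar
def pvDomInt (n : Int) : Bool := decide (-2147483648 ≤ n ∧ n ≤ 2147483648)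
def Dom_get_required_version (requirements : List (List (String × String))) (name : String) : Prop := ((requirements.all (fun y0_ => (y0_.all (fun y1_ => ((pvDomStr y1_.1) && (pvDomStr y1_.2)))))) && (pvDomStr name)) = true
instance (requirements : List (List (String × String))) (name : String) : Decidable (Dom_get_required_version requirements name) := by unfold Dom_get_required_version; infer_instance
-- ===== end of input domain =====

-- B replaces A's per-item name-equality branch by one pass building a name→version dict, then a single lookup.
-- ===== PORT A =====
-- dict lookup on an association list: first match (Python dict keys are unique)
def pvLook (item : List (String × String)) (k : String) : Option String :=
  (item.find? (fun p => p.1 == k)).map (·.2)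

def get_required_version (requirements : List (List (String × String))) (name : String) : Option String :=
  requirements.foldl
    (fun version item =>
      if pvLook item "name" == some name then
        match pvLook item "version" with
        | some v => some v        -- version = item['version']
        | none => version         -- except KeyError: pass
      else version)
    none

-- ===== PORT B =====
def get_required_version_alt (requirements : List (List (String × String))) (name : String) : Option String :=
  (requirements.foldl
    (fun table item =>
      match pvLook item "version" with
      | some v =>
        match pvLook item "name" with
        | some n => table.insert n v
        | none => table           -- unreachable under Pre_ (item['name'] would raise)
      | none => table)
    (PySem.Dict.empty : PySem.Dict String String)).get? name

-- ===== PRECONDITION & SPEC =====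
-- Pre_ excludes exactly the inputs where A raises KeyError: an item without a 'name' key.
def Pre_get_required_version (requirements : List (List (String × String))) (name : String) : Prop :=
  ∀ item ∈ requirements, (pvLook item "name").isSome
instance (requirements : List (List (String × String))) (name : String) : Decidable (Pre_get_required_version requirements name) := by unfold Pre_get_required_version; infer_instance
def pvWitness_get_required_version : (List (List (String × String))) × String :=
  ([[("name", "a"), ("version", "1")], [("name", "b")]], "a")

def Spec_get_required_version (requirements : List (List (String × String))) (name : String) (out : Option String) : Prop := out = get_required_version_alt requirements name
instance (requirements : List (List (String × String))) (name : String) (out : Option String) : Decidable (Spec_get_required_version requirements name out) := by unfold Spec_get_required_version; infer_instance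

-- ===== CLAIM (what is proved, stated in full; the proofs are below) =====
def Claim_equal_get_required_version : Prop := ∀ (requirements : List (List (String × String))) (name : String), Dom_get_required_version requirements name → Pre_get_required_version requirements name → Spec_get_required_version requirements name (get_required_version requirements name)
-- ===== LEMMAS AND PROOFS =====
-- Loop invariant: if the table's entry for `name` equals A's accumulator, it stays so through the lists.
theorem pv_invariant (name : String) (reqs : List (List (String × String)))
    (h : ∀ item ∈ reqs, (pvLook item "name").isSome) :
    ∀ (t : PySem.Dict String String) (acc : Option String), t.get? name = acc →
    (reqs.foldl
      (fun table item =>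
        match pvLook item "version" with
        | some v =>
          match pvLook item "name" with
          | some n => table.insert n v
          | none => table
        | none => table)
      t).get? name =
    reqs.foldl
      (fun version item =>
        if pvLook item "name" == some name then
          match pvLook item "version" with
          | some v => some v
          | none => version
        else version)
      acc := by
  induction reqs with
  | nil => intro t acc ht; simpa using ht
  | cons item rest ih =>
    intro t acc ht
    have hname := h item (by simp)
    have hrest : ∀ i ∈ rest, (pvLook i "name").isSome := fun i hi => h i (by simp [hi])
    obtain ⟨n, hn⟩ := Option.isSome_iff_exists.mp hname
    simp only [List.foldl_cons, hn]
    cases hv : pvLook item "version" with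
    | none =>
      rw [ite_self]
      exact ih hrest t acc ht
    | some v =>
      by_cases hne : n = name
      · subst hne
        rw [if_pos (by simp)]
        exact ih hrest _ _ (PySem.Dict.get?_insert_self t n v)
      · rw [if_neg (by simp [hne])]
        refine ih hrest _ _ ?_
        rw [PySem.Dict.get?_insert_of_ne t v (Ne.symm hne)]
        exact ht

-- ===== VERDICT (by name: the statement is the Claim_ definition above) =====
theorem get_required_version_spec : Claim_equal_get_required_version := by
  intro reqs name _ hpre
  unfold Spec_get_required_version get_required_version get_required_version_alt
  exact (pv_invariant name reqs hpre PySem.Dict.empty none (by simp)).symm
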